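-- pv_equiv track=rewrite | github.com/koomri/text-segmentation | accuracy.py | get_seg_boundaries
-- ===== SOURCE A (Python) =====
-- def get_seg_boundaries(classifications, sentences_length = None):
--     """
--     :param list of tuples, each tuple is a sentence and its class (1 if it the sentence starts a segment, 0 otherwise).
--     e.g: [(this is, 0), (a segment, 1) , (and another one, 1)
--     :return: boundaries of segmentation to use for pk method. For given example the function will return (4, 3)
--     """
--     curr_seg_length = 0
--     boundaries = []
--     for i, classification in enumerate(classifications):
--         is_split_point = bool(classifications[i])
--         add_to_current_segment = 1 if sentences_length is None else sentences_length[i]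
--         curr_seg_length += add_to_current_segment
--         if (is_split_point):
--             boundaries.append(curr_seg_length)
--             curr_seg_length = 0
--
--     return boundaries
-- ===== SOURCE B (Python) =====
-- def get_seg_boundaries(classifications, sentences_length=None):
--     n = len(classifications)
--     weights = [1] * n if sentences_length is None else [sentences_length[i] for i in range(n)]
--     prefix = [0]
--     for w in weights:
--         prefix.append(prefix[-1] + w)
--     splits = [i for i, c in enumerate(classifications) if c]
--     return [prefix[s + 1] - prefix[p + 1] for p, s in zip([-1] + splits, splits)]
-- ===== Notes on version B (the rewrite author's own statement) =====
-- stated objective: alternative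
-- what changed: Replaces the running-accumulator loop by a prefix-sum array over the per-sentence weights plus the list of split indices; each boundary length is a difference of two prefix sums at consecutive split positions.
import Mathlib
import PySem

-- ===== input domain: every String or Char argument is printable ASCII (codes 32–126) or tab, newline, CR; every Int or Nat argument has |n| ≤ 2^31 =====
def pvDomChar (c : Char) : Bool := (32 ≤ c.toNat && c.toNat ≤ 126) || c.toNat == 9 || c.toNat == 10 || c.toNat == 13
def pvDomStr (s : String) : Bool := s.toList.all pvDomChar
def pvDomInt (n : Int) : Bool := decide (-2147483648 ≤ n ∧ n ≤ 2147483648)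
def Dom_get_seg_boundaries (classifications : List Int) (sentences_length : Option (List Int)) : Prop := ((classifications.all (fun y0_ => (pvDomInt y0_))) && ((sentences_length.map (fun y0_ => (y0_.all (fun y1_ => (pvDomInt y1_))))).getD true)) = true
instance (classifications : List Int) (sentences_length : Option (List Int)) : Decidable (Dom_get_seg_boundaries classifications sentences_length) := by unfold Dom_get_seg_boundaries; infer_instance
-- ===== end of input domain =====

-- B replaces A's running-accumulator loop by prefix sums over weights plus split indices (alternative decomposition, same cost).


-- ===== PORT A =====
def get_seg_boundaries (classifications : List Int) (sentences_length : Option (List Int)) : List Int :=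
  ((PySem.List.enumerate classifications 0).foldl
    (fun (st : Int × List Int) (p : Int × Int) =>
      let is_split_point : Bool := p.2 != 0
      let add_to_current_segment : Int :=
        match sentences_length with
        | none => 1
        | some ls => PySem.List.pyGetD ls p.1 0
      let curr_seg_length := st.1 + add_to_current_segment
      if is_split_point then (0, st.2 ++ [curr_seg_length]) else (curr_seg_length, st.2))
    (0, [])).2

-- ===== PORT B =====
def get_seg_boundaries_alt (classifications : List Int) (sentences_length : Option (List Int)) : List Int :=
  let n := classifications.length
  let weights : List Int :=
    match sentences_length with
    | none => List.replicate n 1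
    | some ls => (PySem.List.pyRange 0 (n : Int) 1).map (fun i => PySem.List.pyGetD ls i 0)
  let pfx : List Int := weights.foldl (fun pr w => pr ++ [PySem.List.pyGetD pr (-1) 0 + w]) [0]
  let splits : List Int := (PySem.List.enumerate classifications 0).filterMap
    (fun p => if p.2 ≠ 0 then some p.1 else none)
  (((-1 : Int) :: splits).zip splits).map
    (fun q => PySem.List.pyGetD pfx (q.2 + 1) 0 - PySem.List.pyGetD pfx (q.1 + 1) 0)

-- ===== PRECONDITION & SPEC =====
-- Pre_ excludes exactly the inputs where A raises IndexError: sentences_length given but shorter than classifications.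
def Pre_get_seg_boundaries (classifications : List Int) (sentences_length : Option (List Int)) : Prop :=
  ((sentences_length.map (fun ls => decide (classifications.length ≤ ls.length))).getD true) = true
instance (classifications : List Int) (sentences_length : Option (List Int)) : Decidable (Pre_get_seg_boundaries classifications sentences_length) := by unfold Pre_get_seg_boundaries; infer_instance
def pvWitness_get_seg_boundaries : List Int × Option (List Int) := ([1, 0, 1], some [2, 3, 4])

def Spec_get_seg_boundaries (classifications : List Int) (sentences_length : Option (List Int)) (out : List Int) : Prop := out = get_seg_boundaries_alt classifications sentences_length
instance (classifications : List Int) (sentences_length : Option (List Int)) (out : List Int) : Decidable (Spec_get_seg_boundaries classifications sentences_length out) := by unfold Spec_get_seg_boundaries; infer_instance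

-- ===== CLAIM (what is proved, stated in full; the proofs are below) =====
def Claim_equal_get_seg_boundaries : Prop := ∀ (classifications : List Int) (sentences_length : Option (List Int)), Dom_get_seg_boundaries classifications sentences_length → Pre_get_seg_boundaries classifications sentences_length → Spec_get_seg_boundaries classifications sentences_length (get_seg_boundaries classifications sentences_length)

-- ===== LEMMAS AND PROOFS =====

def pvStep (st : Int × List Int) (p : Int × Int) : Int × List Int :=
  if p.1 ≠ 0 then (0, st.2 ++ [st.1 + p.2]) else (st.1 + p.2, st.2)

def pvSplits (cs : List Int) : List Int :=
  (PySem.List.enumerate cs 0).filterMap (fun p => if p.2 ≠ 0 then some p.1 else none)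

def pvTsum (ws : List Int) (k : Int) : Int := (ws.take k.toNat).sum

def pvBval (cs ws : List Int) : List Int :=
  (((-1 : Int) :: pvSplits cs).zip (pvSplits cs)).map
    (fun q => pvTsum ws (q.2 + 1) - pvTsum ws (q.1 + 1))

theorem pvSplits_append (cs : List Int) (c : Int) :
    pvSplits (cs ++ [c]) = pvSplits cs ++ (if c ≠ 0 then [(cs.length : Int)] else []) := by
  unfold pvSplits
  rw [PySem.List.enumerate_append, List.filterMap_append]
  simp [PySem.List.enumerate]
  by_cases hc : c = 0 <;> simp [hc]

theorem pvSplits_mem_bounds (cs : List Int) (s : Int) (h : s ∈ pvSplits cs) :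
    0 ≤ s ∧ s < cs.length := by
  unfold pvSplits at h
  rw [List.mem_filterMap] at h
  obtain ⟨p, hp, he⟩ := h
  rw [PySem.List.mem_enumerate_iff] at hp
  obtain ⟨k, hk, rfl⟩ := hp
  simp only [] at he
  by_cases hc : cs[k] = 0 <;> simp [hc] at he
  omega

theorem pvZip_cons_append (l : List Int) (a x : Int) :
    ((a :: (l ++ [x])).zip (l ++ [x])) = ((a :: l).zip l) ++ [(l.getLastD a, x)] := by
  induction l generalizing a with
  | nil => simp
  | cons y t ih =>
    simp only [List.cons_append, List.zip_cons_cons, ih y]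
    cases t with
    | nil => simp
    | cons h t' =>
      cases hl : (h :: t').getLast? with
      | none => simp [List.getLast?_eq_none_iff] at hl
      | some z => simp [hl]

theorem pvTsum_append (ws : List Int) (w k : Int) (h2 : k.toNat ≤ ws.length) :
    pvTsum (ws ++ [w]) k = pvTsum ws k := by
  unfold pvTsum
  rw [List.take_append_of_le_length h2]

theorem pvLastD_bounds (cs : List Int) :
    -1 ≤ (pvSplits cs).getLastD (-1) ∧ (pvSplits cs).getLastD (-1) < cs.length ∨ pvSplits cs = [] := by
  cases hs : pvSplits cs with
  | nil => right; rfl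
  | cons a t =>
    left
    have hmem : (a :: t).getLastD (-1) ∈ pvSplits cs := by
      rw [hs]; simp [List.getLastD_eq_getLast?]
      cases hl : (a :: t).getLast? with
      | none => simp [List.getLast?_eq_none_iff] at hl
      | some z => simpa using List.mem_of_getLast? hl
    have := pvSplits_mem_bounds cs _ hmem
    omega

theorem pvMain (cs : List Int) : ∀ (ws : List Int), ws.length = cs.length →
    (cs.zip ws).foldl pvStep (0, []) =
      (ws.sum - pvTsum ws ((pvSplits cs).getLastD (-1) + 1), pvBval cs ws) := by
  induction cs using List.reverseRecOn with
  | nil =>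
    intro ws h
    simp only [List.length_nil] at h
    rw [List.length_eq_zero_iff] at h; subst h
    simp [pvSplits, pvBval, pvTsum, PySem.List.enumerate]
  | append_singleton cs c ih =>
    intro ws h
    have hne : ws ≠ [] := by intro e; subst e; simp at h
    obtain ⟨ws', w, rfl⟩ : ∃ ws' w, ws = ws' ++ [w] :=
      ⟨ws.dropLast, ws.getLast hne, (List.dropLast_append_getLast hne).symm⟩
    have hlen : ws'.length = cs.length := by
      simp at h; omega
    have hbnd : -1 ≤ (pvSplits cs).getLastD (-1) ∧ (pvSplits cs).getLastD (-1) + 1 ≤ cs.length := by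
      rcases pvLastD_bounds cs with ⟨h1, h2⟩ | hnil
      · omega
      · rw [hnil]; simp
    have hzipmem : ∀ q ∈ ((-1 : Int) :: pvSplits cs).zip (pvSplits cs),
        (q.1 + 1).toNat ≤ ws'.length ∧ (q.2 + 1).toNat ≤ ws'.length := by
      intro q hq
      have h1 := List.of_mem_zip hq
      have hb1 : q.1 = -1 ∨ q.1 ∈ pvSplits cs := by
        rcases List.mem_cons.mp h1.1 with h | h
        · left; exact h
        · right; exact h
      have hb2 := pvSplits_mem_bounds cs q.2 h1.2
      rcases hb1 with h | h
      · have := pvSplits_mem_bounds cs q.1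
        constructor
        · simp [h]
        · omega
      · have := pvSplits_mem_bounds cs q.1 h
        constructor <;> omega
    have hBval : pvBval (cs ++ [c]) (ws' ++ [w]) =
        if c ≠ 0 then pvBval cs ws' ++ [(ws'.sum + w) - pvTsum ws' ((pvSplits cs).getLastD (-1) + 1)]
        else pvBval cs ws' := by
      unfold pvBval
      rw [pvSplits_append]
      by_cases hc : c = 0
      · have h0 : ¬ (c ≠ 0) := by simp [hc]
        rw [if_neg h0, if_neg h0, List.append_nil]
        apply List.map_congr_left
        intro q hq
        have := hzipmem q hq
        rw [pvTsum_append _ _ _ this.2, pvTsum_append _ _ _ this.1]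
      · rw [if_pos hc, if_pos hc, pvZip_cons_append, List.map_append]
        congr 1
        · apply List.map_congr_left
          intro q hq
          have := hzipmem q hq
          rw [pvTsum_append _ _ _ this.2, pvTsum_append _ _ _ this.1]
        · simp only [List.map_cons, List.map_nil]
          congr 1
          congr 1
          · -- pvTsum (ws' ++ [w]) (cs.length + 1) = ws'.sum + w
            unfold pvTsum
            have : ((cs.length : Int) + 1).toNat = ws'.length + 1 := by omega
            rw [this, List.take_of_length_le (by simp), List.sum_append]
            simp
          · rw [pvTsum_append _ _ _ (by omega)]
    rw [List.zip_append hlen.symm, List.foldl_append, ih ws' hlen]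
    simp only [List.zip_cons_cons, List.zip_nil_right, List.foldl_cons, List.foldl_nil]
    rw [hBval, pvSplits_append]
    unfold pvStep
    by_cases hc : c = 0
    · have h0 : ¬ (c ≠ 0) := by simp [hc]
      rw [if_neg h0, if_neg h0, if_neg h0, List.append_nil]
      simp only [Prod.mk.injEq]
      refine ⟨?_, trivial⟩
      rw [List.sum_append, pvTsum_append _ _ _ (by omega)]
      simp
      ring
    · have h1 : c ≠ 0 := hc
      rw [if_pos h1, if_pos h1, if_pos h1, List.getLastD_concat]
      simp only [Prod.mk.injEq]
      refine ⟨?_, by rw [sub_add_eq_add_sub]⟩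
      unfold pvTsum
      have hh : ((cs.length : Int) + 1).toNat = ws'.length + 1 := by omega
      rw [hh, List.take_of_length_le (by simp), List.sum_append]
      simp

def pvWeights (cs : List Int) (sl : Option (List Int)) : List Int :=
  match sl with
  | none => List.replicate cs.length 1
  | some ls => ls.take cs.length

theorem pvPfx_fold (ws : List Int) : ∀ (init : List Int) (a : Int),
    ws.foldl (fun pr w => pr ++ [PySem.List.pyGetD pr (-1) 0 + w]) (init ++ [a]) =
      (init ++ [a]) ++ (List.range ws.length).map (fun k => a + (ws.take (k + 1)).sum) := by
  induction ws with
  | nil => intro init a; simp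
  | cons w t ih =>
    intro init a
    simp only [List.foldl_cons, PySem.List.pyGetD_neg_one_append_singleton]
    rw [ih (init ++ [a]) (a + w)]
    simp only [List.length_cons, List.range_succ_eq_map, List.map_cons, List.map_map,
      List.take_succ_cons, List.sum_cons]
    rw [List.append_assoc (init ++ [a])]
    congr 1
    rw [List.singleton_append]
    congr 1
    · simp
    · apply List.map_congr_left
      intro k _
      simp
      ring

theorem pvPfx_getD (ws : List Int) (k : Nat) (hk : k ≤ ws.length) :
    PySem.List.pyGetD (ws.foldl (fun pr w => pr ++ [PySem.List.pyGetD pr (-1) 0 + w]) [0]) (k : Int) 0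
      = (ws.take k).sum := by
  have h := pvPfx_fold ws [] 0
  simp only [List.nil_append] at h
  rw [h, PySem.List.pyGetD_natCast]
  cases k with
  | zero => simp
  | succ j =>
    have hj : j < ws.length := by omega
    unfold List.getD
    rw [List.singleton_append, List.getElem?_cons_succ, List.getElem?_map, List.getElem?_range hj]
    simp

theorem pvPfx_getD_int (ws : List Int) (i : Int) (h0 : 0 ≤ i) (h1 : i ≤ ws.length) :
    PySem.List.pyGetD (ws.foldl (fun pr w => pr ++ [PySem.List.pyGetD pr (-1) 0 + w]) [0]) i 0
      = pvTsum ws i := by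
  have : i = ((i.toNat : Nat) : Int) := by omega
  rw [this, pvPfx_getD ws i.toNat (by omega)]
  rfl

theorem pvWeights_some (ls : List Int) (n : Nat) (h : n ≤ ls.length) :
    (PySem.List.pyRange 0 (n : Int) 1).map (fun i => PySem.List.pyGetD ls i 0) = ls.take n := by
  rw [PySem.List.pyRange_one]
  rw [List.map_map]
  apply List.ext_getElem
  · simp; omega
  · intro k h1 h2
    simp only [List.getElem_map, List.getElem_range, Function.comp_apply, List.getElem_take]
    have hk : k < n := by simp at h1; omega
    have : (0 : Int) + (k : Int) = ((k : Nat) : Int) := by omega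
    rw [this, PySem.List.pyGetD_natCast]
    rw [List.getD_eq_getElem ls 0 (by omega)]

theorem pvA_none (cs : List Int) : ∀ (s : Int) (st : Int × List Int),
    (PySem.List.enumerate cs s).foldl
      (fun (st : Int × List Int) (p : Int × Int) =>
        let is_split_point : Bool := p.2 != 0
        let add_to_current_segment : Int := 1
        let curr_seg_length := st.1 + add_to_current_segment
        if is_split_point then (0, st.2 ++ [curr_seg_length]) else (curr_seg_length, st.2)) st
    = (cs.zip (List.replicate cs.length 1)).foldl pvStep st := by
  induction cs with
  | nil => intro s st; simp [PySem.List.enumerate]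
  | cons x t ih =>
    intro s st
    rw [PySem.List.enumerate_cons]
    simp only [List.foldl_cons, List.length_cons, List.replicate_succ, List.zip_cons_cons]
    rw [ih (s + 1)]
    congr 1
    by_cases hx : x = 0 <;> simp [pvStep, hx]

theorem pvA_some (ls : List Int) (cs : List Int) : ∀ (s : Nat) (st : Int × List Int),
    s + cs.length ≤ ls.length →
    (PySem.List.enumerate cs (s : Int)).foldl
      (fun (st : Int × List Int) (p : Int × Int) =>
        let is_split_point : Bool := p.2 != 0
        let add_to_current_segment : Int := PySem.List.pyGetD ls p.1 0
        let curr_seg_length := st.1 + add_to_current_segment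
        if is_split_point then (0, st.2 ++ [curr_seg_length]) else (curr_seg_length, st.2)) st
    = (cs.zip ((ls.drop s).take cs.length)).foldl pvStep st := by
  induction cs with
  | nil => intro s st _; simp [PySem.List.enumerate]
  | cons x t ih =>
    intro s st hs
    have hslt : s < ls.length := by simp at hs; omega
    rw [PySem.List.enumerate_cons]
    rw [List.drop_eq_getElem_cons hslt]
    simp only [List.foldl_cons, List.length_cons, List.take_succ_cons, List.zip_cons_cons]
    have hcast : (s : Int) + 1 = ((s + 1 : Nat) : Int) := by omega
    rw [hcast, ih (s + 1) _ (by simp at hs ⊢; omega)]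
    congr 1
    have hget : PySem.List.pyGetD ls (s : Int) 0 = ls[s] := by
      rw [PySem.List.pyGetD_natCast, List.getD_eq_getElem ls 0 hslt]
    by_cases hx : x = 0 <;> simp [pvStep, hx, hget]

theorem pvWeights_length (cs : List Int) (sl : Option (List Int))
    (hpre : ∀ ls, sl = some ls → cs.length ≤ ls.length) :
    (pvWeights cs sl).length = cs.length := by
  cases sl with
  | none => simp [pvWeights]
  | some ls => simp [pvWeights]; exact hpre ls rfl

theorem pvA_eq (cs : List Int) (sl : Option (List Int))
    (hpre : ∀ ls, sl = some ls → cs.length ≤ ls.length) :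
    get_seg_boundaries cs sl = ((cs.zip (pvWeights cs sl)).foldl pvStep (0, [])).2 := by
  cases sl with
  | none => exact congrArg Prod.snd (pvA_none cs 0 (0, []))
  | some ls =>
    have h := hpre ls rfl
    exact congrArg Prod.snd (pvA_some ls cs 0 (0, []) (by omega))

theorem pvB_tail (cs ws : List Int) (hlen : ws.length = cs.length) :
    (((-1 : Int) :: pvSplits cs).zip (pvSplits cs)).map
      (fun q =>
        PySem.List.pyGetD (ws.foldl (fun pr w => pr ++ [PySem.List.pyGetD pr (-1) 0 + w]) [0]) (q.2 + 1) 0 -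
        PySem.List.pyGetD (ws.foldl (fun pr w => pr ++ [PySem.List.pyGetD pr (-1) 0 + w]) [0]) (q.1 + 1) 0)
      = pvBval cs ws := by
  unfold pvBval
  apply List.map_congr_left
  intro q hq
  have h1 := List.of_mem_zip hq
  have hb2 := pvSplits_mem_bounds cs q.2 h1.2
  have hb1 : -1 ≤ q.1 ∧ q.1 < cs.length := by
    rcases List.mem_cons.mp h1.1 with h | h
    · rw [h]; constructor
      · omega
      · omega
    · have := pvSplits_mem_bounds cs q.1 h
      omega
  rw [pvPfx_getD_int _ _ (by omega) (by omega), pvPfx_getD_int _ _ (by omega) (by omega)]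

theorem pvB_eq (cs : List Int) (sl : Option (List Int))
    (hpre : ∀ ls, sl = some ls → cs.length ≤ ls.length) :
    get_seg_boundaries_alt cs sl = pvBval cs (pvWeights cs sl) := by
  have hsp : (List.filterMap (fun (p : Int × Int) => if p.2 ≠ 0 then some p.1 else none) (PySem.List.enumerate cs 0)) = pvSplits cs := rfl
  cases sl with
  | none =>
    simp only [get_seg_boundaries_alt]
    rw [hsp]
    exact pvB_tail cs (List.replicate cs.length 1) (by simp)
  | some ls =>
    simp only [get_seg_boundaries_alt]
    rw [pvWeights_some ls cs.length (hpre ls rfl), hsp]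
    exact pvB_tail cs (ls.take cs.length) (by simp [hpre ls rfl])

theorem pv_pre_elim (cs : List Int) (sl : Option (List Int))
    (hpre : Pre_get_seg_boundaries cs sl) :
    ∀ ls, sl = some ls → cs.length ≤ ls.length := by
  intro ls e
  subst e
  unfold Pre_get_seg_boundaries at hpre
  simpa using hpre

-- ===== VERDICT (by name: the statement is the Claim_ definition above) =====
theorem get_seg_boundaries_spec : Claim_equal_get_seg_boundaries := by
  intro cs sl _ hpre
  unfold Spec_get_seg_boundaries
  have hp := pv_pre_elim cs sl hpre
  rw [pvA_eq cs sl hp, pvB_eq cs sl hp,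
    pvMain cs (pvWeights cs sl) (pvWeights_length cs sl hp)]
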